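-- pv_equiv track=rewrite | github.com/MGPuneeth/sokoban-solver | backend/solver/utils.py | parse_level
-- ===== SOURCE A (Python) =====
-- def parse_level(level):
--
--     walls = set()
--     boxes = []
--     goals = []
--     player = None
--
--     for i, row in enumerate(level):
--         for j, ch in enumerate(row):
--
--             if ch == '#':
--                 walls.add((i, j))
--             elif ch == 'P':
--                 player = (i, j)
--             elif ch == 'B':
--                 boxes.append((i, j))
--             elif ch == '.':
--                 goals.append((i, j))
--             elif ch == '*':  # box on goal
--                 boxes.append((i, j))
--                 goals.append((i, j))
--             elif ch == '+':  # player on goal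
--                 player = (i, j)
--                 goals.append((i, j))
--
--     return player, tuple(boxes), tuple(goals), walls
-- ===== SOURCE B (Python) =====
-- def parse_level(level):
--     cells = [(i, j, ch) for i, row in enumerate(level) for j, ch in enumerate(row)]
--     player = None
--     for i, j, ch in reversed(cells):
--         if ch in ('P', '+'):
--             player = (i, j)
--             break
--     walls = {(i, j) for i, j, ch in cells if ch == '#'}
--     boxes = tuple((i, j) for i, j, ch in cells if ch in ('B', '*'))
--     goals = tuple((i, j) for i, j, ch in cells if ch in ('.', '*', '+'))
--     return player, boxes, goals, walls
-- ===== Notes on version B (the rewrite author's own statement) =====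
-- stated objective: alternative
-- what changed: A threads four accumulators through one nested character loop; B flattens the grid once into (i,j,ch) cells and derives each output independently (walls/boxes/goals by filtering the cell list, the player by scanning it backwards for the first 'P'/'+').
import Mathlib
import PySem

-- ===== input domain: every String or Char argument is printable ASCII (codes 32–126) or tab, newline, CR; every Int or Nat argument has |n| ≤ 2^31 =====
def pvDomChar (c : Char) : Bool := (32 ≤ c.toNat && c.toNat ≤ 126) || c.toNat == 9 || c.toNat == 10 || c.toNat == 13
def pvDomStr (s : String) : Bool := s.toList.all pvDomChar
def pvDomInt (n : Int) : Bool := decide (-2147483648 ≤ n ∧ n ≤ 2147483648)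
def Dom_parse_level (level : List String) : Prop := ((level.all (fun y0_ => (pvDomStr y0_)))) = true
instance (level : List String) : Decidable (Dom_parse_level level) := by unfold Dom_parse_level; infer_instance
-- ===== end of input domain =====

-- B restructures A: one flattened cell list, each of the four outputs derived from it independently (alternative decomposition, same cost).

-- ===== PORT A =====
-- literal nested loop over enumerate(level) / enumerate(row), threading (player, boxes, goals, walls)
def parse_level (level : List String) : (Option (Int × Int)) × (List (Int × Int)) × (List (Int × Int)) × (List (Int × Int)) :=
  (PySem.List.enumerate level 0).foldl (fun st irow =>
    (PySem.List.enumerate irow.2.toList 0).foldl (fun st jch =>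
      let i := irow.1
      let j := jch.1
      let ch := jch.2
      if ch == '#' then (st.1, st.2.1, st.2.2.1, PySem.Set.add st.2.2.2 (i, j))
      else if ch == 'P' then (some (i, j), st.2.1, st.2.2.1, st.2.2.2)
      else if ch == 'B' then (st.1, st.2.1 ++ [(i, j)], st.2.2.1, st.2.2.2)
      else if ch == '.' then (st.1, st.2.1, st.2.2.1 ++ [(i, j)], st.2.2.2)
      else if ch == '*' then (st.1, st.2.1 ++ [(i, j)], st.2.2.1 ++ [(i, j)], st.2.2.2)
      else if ch == '+' then (some (i, j), st.2.1, st.2.2.1 ++ [(i, j)], st.2.2.2)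
      else st) st)
    (none, [], [], PySem.Set.empty)

-- ===== PORT B =====
-- the flattened cell list [(i, j, ch) …]
def pvCells (level : List String) : List (Int × Int × Char) :=
  (PySem.List.enumerate level 0).flatMap (fun irow =>
    (PySem.List.enumerate irow.2.toList 0).map (fun jch => (irow.1, jch.1, jch.2)))

def parse_level_alt (level : List String) : (Option (Int × Int)) × (List (Int × Int)) × (List (Int × Int)) × (List (Int × Int)) :=
  let cells := pvCells level
  let player := (cells.reverse.find? (fun c => c.2.2 == 'P' || c.2.2 == '+')).map (fun c => (c.1, c.2.1))
  let walls := PySem.Set.ofList ((cells.filter (fun c => c.2.2 == '#')).map (fun c => (c.1, c.2.1)))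
  let boxes := (cells.filter (fun c => c.2.2 == 'B' || c.2.2 == '*')).map (fun c => (c.1, c.2.1))
  let goals := (cells.filter (fun c => c.2.2 == '.' || c.2.2 == '*' || c.2.2 == '+')).map (fun c => (c.1, c.2.1))
  (player, boxes, goals, walls)

-- ===== PRECONDITION & SPEC =====
def Spec_parse_level (level : List String) (out : (Option (Int × Int)) × (List (Int × Int)) × (List (Int × Int)) × (List (Int × Int))) : Prop := out = parse_level_alt level
instance (level : List String) (out : (Option (Int × Int)) × (List (Int × Int)) × (List (Int × Int)) × (List (Int × Int))) : Decidable (Spec_parse_level level out) := by unfold Spec_parse_level; infer_instance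

-- ===== CLAIM (what is proved, stated in full; the proofs are below) =====
def Claim_equal_parse_level : Prop := ∀ (level : List String), Dom_parse_level level → Spec_parse_level level (parse_level level)

-- ===== LEMMAS AND PROOFS =====

-- A's loop body, on a flattened cell
def pvStep (st : (Option (Int × Int)) × (List (Int × Int)) × (List (Int × Int)) × (List (Int × Int)))
    (c : Int × Int × Char) : (Option (Int × Int)) × (List (Int × Int)) × (List (Int × Int)) × (List (Int × Int)) :=
  if c.2.2 == '#' then (st.1, st.2.1, st.2.2.1, PySem.Set.add st.2.2.2 (c.1, c.2.1))
  else if c.2.2 == 'P' then (some (c.1, c.2.1), st.2.1, st.2.2.1, st.2.2.2)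
  else if c.2.2 == 'B' then (st.1, st.2.1 ++ [(c.1, c.2.1)], st.2.2.1, st.2.2.2)
  else if c.2.2 == '.' then (st.1, st.2.1, st.2.2.1 ++ [(c.1, c.2.1)], st.2.2.2)
  else if c.2.2 == '*' then (st.1, st.2.1 ++ [(c.1, c.2.1)], st.2.2.1 ++ [(c.1, c.2.1)], st.2.2.2)
  else if c.2.2 == '+' then (some (c.1, c.2.1), st.2.1, st.2.2.1 ++ [(c.1, c.2.1)], st.2.2.2)
  else st

def pvCellsFrom (level : List String) (s : Int) : List (Int × Int × Char) :=
  (PySem.List.enumerate level s).flatMap (fun irow =>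
    (PySem.List.enumerate irow.2.toList 0).map (fun jch => (irow.1, jch.1, jch.2)))

theorem pvA_eq_foldl_step (level : List String) (s : Int)
    (st : (Option (Int × Int)) × (List (Int × Int)) × (List (Int × Int)) × (List (Int × Int))) :
    (PySem.List.enumerate level s).foldl (fun st irow =>
      (PySem.List.enumerate irow.2.toList 0).foldl (fun st jch =>
        pvStep st (irow.1, jch.1, jch.2)) st) st
    = (pvCellsFrom level s).foldl pvStep st := by
  induction level generalizing s st with
  | nil => simp [pvCellsFrom, PySem.List.enumerate_nil]
  | cons r rs ih =>
    simp only [pvCellsFrom, PySem.List.enumerate_cons, List.flatMap_cons, List.foldl_cons,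
      List.foldl_append, List.foldl_map]
    rw [ih]
    rfl

-- last 'P'/'+' overwrite = first match of the reversed list
theorem pvPlayer_foldl (cells : List (Int × Int × Char)) (p : Option (Int × Int)) :
    cells.foldl (fun acc c => if c.2.2 == 'P' || c.2.2 == '+' then some (c.1, c.2.1) else acc) p
    = ((cells.reverse.find? (fun c => c.2.2 == 'P' || c.2.2 == '+')).map (fun c => (c.1, c.2.1))).or p := by
  induction cells generalizing p with
  | nil => simp
  | cons c cs ih =>
    simp only [List.foldl_cons, List.reverse_cons, List.find?_append, ih]
    cases h : cs.reverse.find? (fun c => c.2.2 == 'P' || c.2.2 == '+') with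
    | some d => simp
    | none =>
      simp only [Option.none_or, List.find?_singleton]
      by_cases hc : (c.2.2 == 'P' || c.2.2 == '+') = true <;> simp [hc]

-- the characterisation of A's fold, component by component
theorem pvFold_char (cells : List (Int × Int × Char)) (p : Option (Int × Int))
    (b g w : List (Int × Int)) :
    cells.foldl pvStep (p, b, g, w)
    = (cells.foldl (fun acc c => if c.2.2 == 'P' || c.2.2 == '+' then some (c.1, c.2.1) else acc) p,
       b ++ (cells.filter (fun c => c.2.2 == 'B' || c.2.2 == '*')).map (fun c => (c.1, c.2.1)),
       g ++ (cells.filter (fun c => c.2.2 == '.' || c.2.2 == '*' || c.2.2 == '+')).map (fun c => (c.1, c.2.1)),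
       ((cells.filter (fun c => c.2.2 == '#')).map (fun c => (c.1, c.2.1))).foldl PySem.Set.add w) := by
  induction cells generalizing p b g w with
  | nil => simp
  | cons c cs ih =>
    obtain ⟨i, j, ch⟩ := c
    simp only [List.foldl_cons, pvStep]
    by_cases h1 : (ch == '#') = true
    · have e : ch = '#' := by simpa using h1
      subst e
      simp [ih]
    · by_cases h2 : (ch == 'P') = true
      · have e : ch = 'P' := by simpa using h2
        subst e
        simp [ih]
      · by_cases h3 : (ch == 'B') = true
        · have e : ch = 'B' := by simpa using h3
          subst e
          simp [ih]
        · by_cases h4 : (ch == '.') = true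
          · have e : ch = '.' := by simpa using h4
            subst e
            simp [ih]
          · by_cases h5 : (ch == '*') = true
            · have e : ch = '*' := by simpa using h5
              subst e
              simp [ih]
            · by_cases h6 : (ch == '+') = true
              · have e : ch = '+' := by simpa using h6
                subst e
                simp [ih]
              · simp [h1, h2, h3, h4, h5, h6, ih]

-- ===== VERDICT (by name: the statement is the Claim_ definition above) =====
theorem parse_level_spec : Claim_equal_parse_level := by
  intro level _
  unfold Spec_parse_level parse_level parse_level_alt
  have hA := pvA_eq_foldl_step level 0 (none, [], [], PySem.Set.empty)
  have hcells : pvCellsFrom level 0 = pvCells level := rfl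
  rw [show (fun (st : (Option (Int × Int)) × (List (Int × Int)) × (List (Int × Int)) × (List (Int × Int))) irow =>
        (PySem.List.enumerate irow.2.toList 0).foldl (fun st jch => pvStep st (irow.1, jch.1, jch.2)) st)
      = (fun st (irow : Int × String) =>
        (PySem.List.enumerate irow.2.toList 0).foldl (fun st jch =>
          let i := irow.1
          let j := jch.1
          let ch := jch.2
          if ch == '#' then (st.1, st.2.1, st.2.2.1, PySem.Set.add st.2.2.2 (i, j))
          else if ch == 'P' then (some (i, j), st.2.1, st.2.2.1, st.2.2.2)
          else if ch == 'B' then (st.1, st.2.1 ++ [(i, j)], st.2.2.1, st.2.2.2)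
          else if ch == '.' then (st.1, st.2.1, st.2.2.1 ++ [(i, j)], st.2.2.2)
          else if ch == '*' then (st.1, st.2.1 ++ [(i, j)], st.2.2.1 ++ [(i, j)], st.2.2.2)
          else if ch == '+' then (some (i, j), st.2.1, st.2.2.1 ++ [(i, j)], st.2.2.2)
          else st) st) from rfl] at hA
  rw [hA, hcells, pvFold_char, pvPlayer_foldl]
  simp [PySem.Set.empty, PySem.Set.ofList_eq_foldl]
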